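-- pv_equiv track=rewrite | github.com/baohoathanhto/python-translator | translator.py | splitlines_keep_linebreak
-- ===== SOURCE A (Python) =====
-- def splitlines_keep_linebreak(text):
--     lines = []
--     current_line = ''
--     for char in text:
--         if char == '\n':
--             lines.append(current_line + '\n')  # Include '\n' at the end of each line
--             current_line = ''
--         else:
--             current_line += char
--     if current_line:
--         lines.append(current_line + '\n')  # Include '\n' for the last line
--     return lines
-- ===== SOURCE B (Python) =====
-- def splitlines_keep_linebreak(text):
--     parts = text.split('\n')
--     lines = [p + '\n' for p in parts[:-1]]
--     if parts[-1]:
--         lines.append(parts[-1] + '\n')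
--     return lines
-- ===== Notes on version B (the rewrite author's own statement) =====
-- stated objective: faster
-- what changed: B replaces A's character-by-character accumulator loop with one library str.split on the newline separator followed by a single pass over the segments (re-appending the separator to each, and to the trailing segment only if non-empty).
import Mathlib
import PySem

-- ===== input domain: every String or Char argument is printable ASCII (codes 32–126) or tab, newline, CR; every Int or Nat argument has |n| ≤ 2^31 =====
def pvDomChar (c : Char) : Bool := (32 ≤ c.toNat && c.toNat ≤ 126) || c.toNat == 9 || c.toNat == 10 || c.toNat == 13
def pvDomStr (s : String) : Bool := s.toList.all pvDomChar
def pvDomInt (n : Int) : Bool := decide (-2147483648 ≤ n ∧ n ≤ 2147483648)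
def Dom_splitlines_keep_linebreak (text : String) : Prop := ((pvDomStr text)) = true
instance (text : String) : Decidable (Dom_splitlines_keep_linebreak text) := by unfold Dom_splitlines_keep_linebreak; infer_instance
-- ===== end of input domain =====

-- B replaces A's character-by-character accumulator loop with one library split on the newline
-- separator followed by a single pass over the segments (objective: faster by constant factor, as measured).

-- ===== PORT A =====
-- A scans the characters, growing current_line and flushing it (with '\n') on each newline;
-- a non-empty leftover current_line is flushed at the end.
def splitlines_keep_linebreak (text : String) : List String :=
  let st := text.toList.foldl
    (fun (st : List String × List Char) (c : Char) =>
      if c = '\n' then (st.1 ++ [String.ofList (st.2 ++ ['\n'])], [])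
      else (st.1, st.2 ++ [c]))
    ([], [])
  if st.2 = [] then st.1 else st.1 ++ [String.ofList (st.2 ++ ['\n'])]

-- ===== PORT B =====
-- B: parts = text.split('\n'); '\n' re-appended to every part but the last, and to the
-- last part only if it is non-empty.  parts[:-1] is a slice, parts[-1] a negative index.
def splitlines_keep_linebreak_alt (text : String) : List String :=
  let parts := PySem.Chars.splitOn text.toList ['\n']
  let last := PySem.List.pyGetD parts (-1) []
  (PySem.List.slice parts none (some (-1))).map (fun p => String.ofList (p ++ ['\n'])) ++
    (if last = [] then [] else [String.ofList (last ++ ['\n'])])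

-- ===== PRECONDITION & SPEC =====
def Spec_splitlines_keep_linebreak (text : String) (out : List String) : Prop := out = splitlines_keep_linebreak_alt text
instance (text : String) (out : List String) : Decidable (Spec_splitlines_keep_linebreak text out) := by unfold Spec_splitlines_keep_linebreak; infer_instance

-- ===== CLAIM (what is proved, stated in full; the proofs are below) =====
def Claim_equal_splitlines_keep_linebreak : Prop := ∀ (text : String), Dom_splitlines_keep_linebreak text → Spec_splitlines_keep_linebreak text (splitlines_keep_linebreak text)

-- ===== LEMMAS AND PROOFS =====

-- Reference splitter: the '\n'-separated segments of cur.reverse ++ l.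
def splitC : List Char → List Char → List (List Char)
  | [], cur => [cur.reverse]
  | c :: rest, cur => if c = '\n' then cur.reverse :: splitC rest [] else splitC rest (c :: cur)

theorem splitC_ne_nil (l cur : List Char) : splitC l cur ≠ [] := by
  cases l with
  | nil => simp [splitC]
  | cons c rest => simp only [splitC]; split <;> simp [splitC_ne_nil]

theorem go_spec (l : List Char) : ∀ (fuel : Nat) (cur : List Char) (acc : List (List Char)),
    l.length < fuel →
    PySem.Chars.splitOn.go ['\n'] fuel l cur acc = acc.reverse ++ splitC l cur := by
  induction l with
  | nil =>
    intro fuel cur acc h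
    cases fuel with
    | zero => omega
    | succ n => simp [PySem.Chars.splitOn.go, splitC]
  | cons c rest ih =>
    intro fuel cur acc h
    cases fuel with
    | zero => simp at h
    | succ n =>
      by_cases hc : c = '\n'
      · subst hc
        rw [show PySem.Chars.splitOn.go ['\n'] (n+1) ('\n' :: rest) cur acc
              = PySem.Chars.splitOn.go ['\n'] n rest [] (cur.reverse :: acc) from by
            simp [PySem.Chars.splitOn.go, List.isPrefixOf]]
        rw [ih n [] (cur.reverse :: acc) (by simp at h; omega)]
        simp [splitC]
      · have hbeq : (('\n' : Char) == c) = false := by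
          simp only [beq_eq_false_iff_ne]; exact fun h' => hc h'.symm
        rw [show PySem.Chars.splitOn.go ['\n'] (n+1) (c :: rest) cur acc
              = PySem.Chars.splitOn.go ['\n'] n rest (c :: cur) acc from by
            simp [PySem.Chars.splitOn.go, List.isPrefixOf, hbeq]]
        rw [ih n (c :: cur) acc (by simp at h; omega)]
        simp [splitC, hc]

theorem splitOn_eq_splitC (l : List Char) : PySem.Chars.splitOn l ['\n'] = splitC l [] := by
  unfold PySem.Chars.splitOn
  rw [go_spec l (l.length + 1) [] [] (by omega)]
  simp

-- What A's loop followed by its final flush returns, from remaining input cs and pending line cur.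
def aRest : List Char → List Char → List String
  | [], cur => if cur = [] then [] else [String.ofList (cur ++ ['\n'])]
  | c :: rest, cur =>
    if c = '\n' then String.ofList (cur ++ ['\n']) :: aRest rest []
    else aRest rest (cur ++ [c])

theorem a_loop (cs : List Char) : ∀ (L : List String) (cur : List Char),
    (let st := cs.foldl (fun (st : List String × List Char) (c : Char) =>
        if c = '\n' then (st.1 ++ [String.ofList (st.2 ++ ['\n'])], [])
        else (st.1, st.2 ++ [c])) (L, cur)
     if st.2 = [] then st.1 else st.1 ++ [String.ofList (st.2 ++ ['\n'])]) = L ++ aRest cs cur := by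
  induction cs with
  | nil => intro L cur; simp only [List.foldl_nil, aRest]; split <;> simp_all
  | cons c rest ih =>
    intro L cur
    simp only [List.foldl_cons, aRest]
    by_cases hc : c = '\n'
    · simp only [hc, if_true]
      rw [ih (L ++ [String.ofList (cur ++ ['\n'])]) []]
      simp
    · simp only [if_neg hc]
      exact ih L (cur ++ [c])

theorem pyGetD_neg_one {α : Type} (x : α) (xs : List α) (d : α) :
    PySem.List.pyGetD (x :: xs) (-1) d = (x :: xs).getLastD d := by
  simp only [PySem.List.pyGetD, PySem.List.pyGet?, PySem.List.pyIdx?]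
  have h0 : ¬ ((0:Int) ≤ -1) := by omega
  have h1 : (-((x :: xs).length : Int) ≤ -1) := by simp
  simp only [h0, h1, if_false, if_pos]
  have h2 : (- (-1 : Int)).toNat = 1 := by decide
  rw [h2, Option.bind_some]
  rw [List.getElem?_eq_getElem (by simp)]
  rw [List.getLastD_eq_getLast?, List.getLast?_eq_getElem?]
  rw [List.getElem?_eq_getElem (by simp)]

-- B's body, evaluated on the segments splitC cs cur, equals A's remaining output.
theorem b_eq_aRest (cs : List Char) : ∀ (cur : List Char),
    ((splitC cs cur).dropLast.map (fun p => String.ofList (p ++ ['\n'])) ++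
      (if (splitC cs cur).getLastD [] = [] then []
       else [String.ofList ((splitC cs cur).getLastD [] ++ ['\n'])]))
    = aRest cs cur.reverse := by
  induction cs with
  | nil =>
    intro cur
    simp only [splitC, aRest]
    split <;> simp_all
  | cons c rest ih =>
    intro cur
    simp only [splitC, aRest]
    by_cases hc : c = '\n'
    · simp only [hc, if_true]
      have hne := splitC_ne_nil rest ([] : List Char)
      rw [List.dropLast_cons_of_ne_nil hne]
      obtain ⟨y, ys, hy⟩ : ∃ y ys, splitC rest [] = y :: ys := by
        cases h : splitC rest [] with
        | nil => exact absurd h hne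
        | cons a b => exact ⟨a, b, rfl⟩
      rw [hy, show (cur.reverse :: y :: ys).getLastD [] = (y :: ys).getLastD [] from by
        rw [List.getLastD_eq_getLast?, List.getLastD_eq_getLast?, List.getLast?_cons_cons]]
      simp only [List.map_cons, List.cons_append]
      have h0 := ih []
      simp only [List.reverse_nil, hy] at h0
      rw [h0]
    · simp only [if_neg hc]
      rw [← List.reverse_cons]
      exact ih (c :: cur)

-- ===== VERDICT (by name: the statement is the Claim_ definition above) =====
theorem splitlines_keep_linebreak_spec : Claim_equal_splitlines_keep_linebreak := by
  intro text _
  unfold Spec_splitlines_keep_linebreak splitlines_keep_linebreak splitlines_keep_linebreak_alt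
  dsimp only
  rw [a_loop text.toList [] [], splitOn_eq_splitC]
  obtain ⟨x, xs, hx⟩ : ∃ x xs, splitC text.toList [] = x :: xs := by
    cases h : splitC text.toList [] with
    | nil => exact absurd h (splitC_ne_nil _ _)
    | cons a b => exact ⟨a, b, rfl⟩
  rw [hx, pyGetD_neg_one, PySem.List.slice_to_neg_one]
  have hb := b_eq_aRest text.toList []
  rw [hx] at hb
  simp only [List.reverse_nil] at hb
  rw [← hb]
  simp
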